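-- pv_equiv track=rewrite | github.com/tsuru7/algorithm-study | typical90/58/A.py | solve
-- ===== SOURCE A (Python) =====
-- def func(x):
--     xtmp = x
--     sum = 0
--     while x > 0:
--         sum += x % 10
--         x = x // 10
--     sum += xtmp
--     return sum % 10**5
--
-- def solve(n,k):
--     jmptbl = [-1 for _ in range(10**5)]
--     order = []
--
--     count = 0
--     jmptbl[n] = count
--     order.append(n)
--     next = func(n)
--     count += 1
--     while jmptbl[next] < 0:
--         jmptbl[next] = count
--         order.append(next)
--         next = func(next)
--         count += 1
--     head = jmptbl[next]
--     loop = count - head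
--
--     if k <= head:
--         return order[k]
--     k -= head
--     k %= loop
--     return order[head+k]
-- ===== SOURCE B (Python) =====
-- def func(x):
--     xtmp = x
--     sum = 0
--     while x > 0:
--         sum += x % 10
--         x = x // 10
--     sum += xtmp
--     return sum % 10**5
--
--
-- def solve(n, k):
--     # Floyd's tortoise-and-hare: O(1) extra space, no 10**5 jump table.
--     slow = func(n)
--     fast = func(func(n))
--     while slow != fast:
--         slow = func(slow)
--         fast = func(func(fast))
--     # find mu (tail length)
--     mu = 0
--     slow = n
--     while slow != fast:
--         slow = func(slow)
--         fast = func(fast)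
--         mu += 1
--     # find lam (cycle length)
--     lam = 1
--     fast = func(slow)
--     while slow != fast:
--         fast = func(fast)
--         lam += 1
--     eff = k if k <= mu else mu + (k - mu) % lam
--     x = n
--     for _ in range(eff):
--         x = func(x)
--     return x
-- ===== Notes on version B (the rewrite author's own statement) =====
-- stated objective: alternative
-- what changed: Replaced the 10**5-entry jump table plus order list with Floyd's tortoise-and-hare cycle detection (O(1) extra space) and a final re-iteration of func to produce the answer.
-- outside the precondition, e.g. on solve(-1, 5): A returns -1, B returns 73; on solve(3, -1): A returns 95, B returns 3
import Mathlib
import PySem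

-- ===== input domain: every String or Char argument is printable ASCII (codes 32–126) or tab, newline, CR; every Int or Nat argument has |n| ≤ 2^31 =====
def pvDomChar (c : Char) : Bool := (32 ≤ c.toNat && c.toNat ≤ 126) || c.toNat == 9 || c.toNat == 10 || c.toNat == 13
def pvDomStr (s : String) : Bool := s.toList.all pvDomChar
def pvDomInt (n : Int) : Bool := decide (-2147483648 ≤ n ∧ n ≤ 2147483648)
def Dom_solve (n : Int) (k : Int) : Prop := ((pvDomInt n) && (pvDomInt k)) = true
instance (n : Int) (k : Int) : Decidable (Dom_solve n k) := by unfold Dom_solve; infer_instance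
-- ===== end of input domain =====

-- B replaces A's 10**5-entry jump table + order list with Floyd's tortoise-and-hare
-- cycle detection (O(1) extra space) and re-iterates func to produce the answer.
-- Equivalence is proved for 0 ≤ n < 10^5 and 0 ≤ k (see Pre_solve).

-- ===== PORT A =====

-- inner while loop of func: while x > 0: sum += x % 10; x = x // 10
-- (fuel = x.toNat is only a totality guard: x strictly decreases each iteration,
-- and once x ≤ 0 the loop body never runs, so the fuel never runs out)
def digitLoop : Nat → Int → Int → Int
  | 0, _, s => s
  | fuel+1, x, s =>
      if 0 < x then digitLoop fuel (PySem.Int.floordiv x 10) (s + PySem.Int.mod x 10) else s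

def func (x : Int) : Int := PySem.Int.mod (digitLoop x.toNat x 0 + x) 100000

-- the while loop of solve: while jmptbl[next] < 0: …  (fuel is only a totality guard)
def aloopF : Nat → Array Int → Array Int → Int → Int → Array Int × Int × Int
  | 0, tbl, ord, count, nxt => (ord, tbl.getD nxt.toNat (-1), count)
  | fuel+1, tbl, ord, count, nxt =>
      let j := tbl.getD nxt.toNat (-1)
      if j < 0 then
        aloopF fuel (tbl.setIfInBounds nxt.toNat count) (ord.push nxt) (count + 1) (func nxt)
      else (ord, j, count)

def solve (n : Int) (k : Int) : Int :=
  let tbl := (Array.replicate 100000 (-1 : Int)).setIfInBounds n.toNat 0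
  let r := aloopF 100000 tbl #[n] 1 (func n)
  let head := r.2.1
  let lp := r.2.2 - head
  if k ≤ head then (PySem.List.pyGet? r.1.toList k).getD 0
  else (PySem.List.pyGet? r.1.toList (head + PySem.Int.mod (k - head) lp)).getD 0

-- ===== PORT B =====

-- phase 1: while slow != fast: slow = func(slow); fast = func(func(fast))
def p1F : Nat → Int → Int → Int
  | 0, _, fast => fast
  | fuel+1, slow, fast => if slow = fast then fast else p1F fuel (func slow) (func (func fast))

-- phase 2: while slow != fast: slow = func(slow); fast = func(fast); mu += 1
def p2F : Nat → Int → Int → Int → Int × Int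
  | 0, mu, slow, _ => (mu, slow)
  | fuel+1, mu, slow, fast => if slow = fast then (mu, slow) else p2F fuel (mu + 1) (func slow) (func fast)

-- phase 3: while slow != fast: fast = func(fast); lam += 1
def p3F : Nat → Int → Int → Int → Int
  | 0, lam, _, _ => lam
  | fuel+1, lam, slow, fast => if slow = fast then lam else p3F fuel (lam + 1) slow (func fast)

-- for _ in range(eff): x = func(x)
def iterF : Nat → Int → Int
  | 0, v => v
  | m+1, v => iterF m (func v)

def solve_alt (n : Int) (k : Int) : Int :=
  let fast1 := p1F 100000 (func n) (func (func n))
  let p2 := p2F 100000 0 n fast1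
  let lam := p3F 100000 1 p2.2 (func p2.2)
  let eff := if k ≤ p2.1 then k else p2.1 + PySem.Int.mod (k - p2.1) lam
  iterF eff.toNat n

-- ===== PRECONDITION & SPEC =====

-- Pre_ excludes: n outside [0, 10^5) — for n < -10^5 or n ≥ 10^5 A raises IndexError, and
-- for -10^5 ≤ n < 0 A's returned value is an accident of Python's negative-index wraparound
-- into the jump table (A returns n itself instead of an iterate); and k < 0, where A's
-- order[k] is Python's accidental indexing from the end (or IndexError).
def Pre_solve (n : Int) (k : Int) : Prop := 0 ≤ n ∧ n < 100000 ∧ 0 ≤ k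
instance (n : Int) (k : Int) : Decidable (Pre_solve n k) := by unfold Pre_solve; infer_instance

def pvWitness_solve : Int × Int := (3, 5)

def Spec_solve (n : Int) (k : Int) (out : Int) : Prop := out = solve_alt n k
instance (n : Int) (k : Int) (out : Int) : Decidable (Spec_solve n k out) := by unfold Spec_solve; infer_instance

-- ===== CLAIM (what is proved, stated in full; the proofs are below) =====
def Claim_equal_solve : Prop := ∀ (n : Int) (k : Int), Dom_solve n k → Pre_solve n k → Spec_solve n k (solve n k)

-- ===== LEMMAS AND PROOFS =====

-- the abstract orbit: X n i = i-th iterate of func starting at n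
def X (n : Int) : Nat → Int := fun i => iterF i n

theorem iterF_func_comm (m : Nat) : ∀ v : Int, iterF m (func v) = func (iterF m v) := by
  induction m with
  | zero => intro v; rfl
  | succ m ih => intro v; simp only [iterF, ih]

theorem X_succ (n : Int) (i : Nat) : X n (i+1) = func (X n i) := by
  show iterF (i+1) n = func (iterF i n)
  simp only [iterF, iterF_func_comm]

theorem func_range (x : Int) : 0 ≤ func x ∧ func x < 100000 := by
  unfold func
  exact ⟨PySem.Int.mod_nonneg _ (by norm_num), PySem.Int.mod_lt _ (by norm_num)⟩

theorem X_range (n : Int) (hn0 : 0 ≤ n) (hn1 : n < 100000) :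
    ∀ i, 0 ≤ X n i ∧ X n i < 100000 := by
  intro i
  cases i with
  | zero => exact ⟨hn0, hn1⟩
  | succ i => rw [X_succ]; exact func_range _

-- pigeonhole: the orbit repeats within the first 10^5 + 1 values, with minimal (h, l)
theorem cycle_exists (n : Int) (hn0 : 0 ≤ n) (hn1 : n < 100000) :
    ∃ hh ll : Nat, 1 ≤ ll ∧ hh + ll ≤ 100000 ∧ X n (hh+ll) = X n hh ∧
      (∀ i j, i < j → j < hh + ll → X n i ≠ X n j) := by
  have hXr := X_range n hn0 hn1
  -- two equal values among X 0 … X 100000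
  have hrep : ∃ b, (b ≤ 100000 ∧ ∃ a, a < b ∧ X n a = X n b) := by
    have hmaps : ∀ i ∈ Finset.range 100001, (X n i).toNat ∈ Finset.range 100000 := by
      intro i _
      have := hXr i
      simp only [Finset.mem_range]
      omega
    have hcard : (Finset.range 100000).card < (Finset.range 100001).card := by simp
    obtain ⟨a, _, b, _, hab, heq⟩ :=
      Finset.exists_ne_map_eq_of_card_lt_of_maps_to hcard hmaps
    have ha' := hXr a
    have hb' := hXr b
    have hvals : X n a = X n b := by omega
    rcases Nat.lt_or_ge a b with hlt | hge
    · exact ⟨b, by simpa [Finset.mem_range, Nat.lt_succ_iff] using ‹b ∈ Finset.range 100001›,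
        a, hlt, hvals⟩
    · have hlt : b < a := lt_of_le_of_ne hge (fun e => hab e.symm)
      exact ⟨a, by simpa [Finset.mem_range, Nat.lt_succ_iff] using ‹a ∈ Finset.range 100001›,
        b, hlt, hvals.symm⟩
  obtain ⟨b0, hb0le, hb0⟩ := hrep
  -- c := first index whose value already occurred
  have hPex : ∃ j, ∃ i, i < j ∧ X n i = X n j := ⟨b0, hb0⟩
  let c := Nat.find hPex
  obtain ⟨i0, hi0c, hi0⟩ : ∃ i, i < c ∧ X n i = X n c := Nat.find_spec hPex
  have hcle : c ≤ b0 := Nat.find_min' hPex hb0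
  -- h := first index with the same value as X c
  have hQex : ∃ i, X n i = X n c := ⟨i0, hi0⟩
  let hh := Nat.find hQex
  have hhh : X n hh = X n c := Nat.find_spec hQex
  have hhle : hh ≤ i0 := Nat.find_min' hQex hi0
  have hhc : hh < c := lt_of_le_of_lt hhle hi0c
  refine ⟨hh, c - hh, by omega, by omega, ?_, ?_⟩
  · rw [show hh + (c - hh) = c from by omega]; exact hhh.symm
  · intro i j hij hjc hXij
    rw [show hh + (c - hh) = c from by omega] at hjc
    exact Nat.find_min hPex hjc ⟨i, hij, hXij⟩

-- eventual periodicity with period ll from index hh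
theorem perS (n : Int) (hh ll : Nat) (hc : X n (hh+ll) = X n hh) :
    ∀ s, X n (hh + s + ll) = X n (hh + s) := by
  intro s
  induction s with
  | zero => simpa using hc
  | succ s ih =>
      rw [show hh + (s+1) + ll = (hh + s + ll) + 1 from by omega, X_succ, ih,
        show hh + (s+1) = (hh + s) + 1 from by omega, X_succ]

theorem perM (n : Int) (hh ll : Nat) (hc : X n (hh+ll) = X n hh) :
    ∀ i, hh ≤ i → ∀ m, X n (i + m * ll) = X n i := by
  intro i hi m
  induction m with
  | zero => simp
  | succ m ih =>
      have := perS n hh ll hc (i + m * ll - hh)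
      rw [show hh + (i + m * ll - hh) + ll = i + (m+1) * ll from by rw [Nat.succ_mul]; omega,
        show hh + (i + m * ll - hh) = i + m * ll from by omega] at this
      rw [this, ih]

-- X i = X j whenever both are beyond hh and indices agree mod ll
theorem eqchar' (n : Int) (hh ll : Nat) (hc : X n (hh+ll) = X n hh)
    (i j : Nat) (hi : hh ≤ i) (hij : i ≤ j) (hdvd : ll ∣ (j - i)) : X n i = X n j := by
  obtain ⟨m, hm⟩ := hdvd
  rw [Nat.mul_comm] at hm
  have := perM n hh ll hc i hi m
  rw [show i + m * ll = j from by omega] at this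
  exact this.symm

-- the complete characterisation of equalities in the orbit
theorem eqchar (n : Int) (hh ll : Nat) (hll : 1 ≤ ll) (hc : X n (hh+ll) = X n hh)
    (hinj : ∀ i j, i < j → j < hh + ll → X n i ≠ X n j) :
    ∀ i j, i ≤ j → X n i = X n j → i = j ∨ (hh ≤ i ∧ ll ∣ (j - i)) := by
  -- reduction of an index into [0, hh+ll)
  have red : ∀ z, X n (if z < hh + ll then z else hh + (z - hh) % ll) = X n z := by
    intro z
    split
    · rfl
    · rename_i hz
      have hzh : hh ≤ z := by omega
      have h1 : (z - hh) % ll + (z - hh) / ll * ll = z - hh := Nat.mod_add_div' _ _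
      have h2 := perM n hh ll hc (hh + (z - hh) % ll) (by omega) ((z - hh) / ll)
      rw [show hh + (z - hh) % ll + (z - hh) / ll * ll = z from by omega] at h2
      exact h2.symm
  have redlt : ∀ z, (if z < hh + ll then z else hh + (z - hh) % ll) < hh + ll := by
    intro z
    split
    · assumption
    · have : (z - hh) % ll < ll := Nat.mod_lt _ (by omega)
      omega
  intro i j hij hXij
  by_cases hijeq : i = j
  · exact Or.inl hijeq
  right
  have hreq : (if i < hh + ll then i else hh + (i - hh) % ll)
      = (if j < hh + ll then j else hh + (j - hh) % ll) := by
    by_contra hne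
    have hXr : X n (if i < hh + ll then i else hh + (i - hh) % ll)
        = X n (if j < hh + ll then j else hh + (j - hh) % ll) := by
      rw [red, red]; exact hXij
    rcases Nat.lt_or_ge (if i < hh + ll then i else hh + (i - hh) % ll)
        (if j < hh + ll then j else hh + (j - hh) % ll) with hlt | hge
    · exact hinj _ _ hlt (redlt j) hXr
    · have hlt : (if j < hh + ll then j else hh + (j - hh) % ll)
          < (if i < hh + ll then i else hh + (i - hh) % ll) := by omega
      exact hinj _ _ hlt (redlt i) hXr.symm
  -- now extract hh ≤ i and the divisibility
  have hjext : ¬ j < hh + ll ∨ j = i := by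
    by_cases hjlt : j < hh + ll
    · right
      by_cases hilt : i < hh + ll
      · simp only [if_pos hilt, if_pos hjlt] at hreq; omega
      · exfalso; omega
    · left; exact hjlt
  rcases hjext with hjge | hje
  · -- j ≥ hh + ll
    by_cases hilt : i < hh + ll
    · -- i < hh + ll ≤ j : i = hh + (j - hh) % ll
      simp only [if_pos hilt, if_neg hjge] at hreq
      have hhi : hh ≤ i := by omega
      refine ⟨hhi, ?_⟩
      have hmod : (i - hh) % ll = (j - hh) % ll := by
        have hlt' : (j - hh) % ll < ll := Nat.mod_lt _ (by omega)
        have : i - hh = (j - hh) % ll := by omega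
        rw [this, Nat.mod_eq_of_lt hlt']
      have hdvd : ll ∣ (j - hh) - (i - hh) := (Nat.modEq_iff_dvd' (by
        have h1 : (j - hh) % ll < ll := Nat.mod_lt _ (by omega)
        omega)).mp hmod
      rwa [show (j - hh) - (i - hh) = j - i from by omega] at hdvd
    · -- both ≥ hh + ll
      simp only [if_neg hilt, if_neg hjge] at hreq
      have hhi : hh ≤ i := by omega
      refine ⟨hhi, ?_⟩
      have hmod : (i - hh) % ll = (j - hh) % ll := by omega
      have hdvd : ll ∣ (j - hh) - (i - hh) := (Nat.modEq_iff_dvd' (by omega)).mp hmod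
      rwa [show (j - hh) - (i - hh) = j - i from by omega] at hdvd
  · exact absurd hje.symm hijeq

-- ---------- A side ----------

-- jump-table invariant: entry v is the first index i < m with X i = v, else -1
def tblInv (n : Int) (m : Nat) (tbl : Array Int) : Prop :=
  tbl.size = 100000 ∧ ∀ v : Nat, v < 100000 →
    (tbl.getD v (-1) = -1 ∧ ∀ i < m, X n i ≠ (v:Int)) ∨
    (∃ i, i < m ∧ tbl.getD v (-1) = (i:Int) ∧ X n i = (v:Int) ∧ ∀ i' < i, X n i' ≠ (v:Int))

theorem getD_lt (tbl : Array Int) (v : Nat) (hv : v < tbl.size) (d : Int) :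
    tbl.getD v d = tbl[v] := by
  simp [Array.getD, hv]

-- table lookup at the moment of exit returns hh
theorem tbl_lookup_exit (n : Int) (hh ll : Nat) (hll : 1 ≤ ll)
    (hc : X n (hh+ll) = X n hh)
    (hinj : ∀ i j, i < j → j < hh + ll → X n i ≠ X n j)
    (hXr : ∀ i, 0 ≤ X n i ∧ X n i < 100000)
    (tbl : Array Int) (hI : tblInv n (hh+ll) tbl) :
    tbl.getD (X n (hh+ll)).toNat (-1) = (hh : Int) := by
  obtain ⟨hsz, hI⟩ := hI
  have hv : (X n (hh+ll)).toNat < 100000 := by have := hXr (hh+ll); omega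
  have hvX : ((X n (hh+ll)).toNat : Int) = X n (hh+ll) := by have := hXr (hh+ll); omega
  rcases hI _ hv with ⟨_, hnone⟩ | ⟨i, him, hval, hXi, hmin⟩
  · exact absurd (by rw [hvX, hc]) (hnone hh (by omega))
  · have hXi' : X n i = X n (hh+ll) := by rw [hXi, hvX]
    have hieq : i = hh := by
      rcases Nat.lt_trichotomy i hh with h1 | h2 | h3
      · exact absurd (hXi'.trans hc) (hinj i hh h1 (by omega))
      · exact h2
      · exact absurd (show X n hh = ((X n (hh+ll)).toNat : Int) by
            rw [hvX]; exact hc.symm) (hmin hh h3)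
    rw [hval, hieq]

theorem aloop_spec (n : Int) (hh ll : Nat) (hll : 1 ≤ ll)
    (hc : X n (hh+ll) = X n hh)
    (hinj : ∀ i j, i < j → j < hh + ll → X n i ≠ X n j)
    (hXr : ∀ i, 0 ≤ X n i ∧ X n i < 100000) :
    ∀ fuel m tbl ord, 1 ≤ m → m ≤ hh + ll → hh + ll - m ≤ fuel →
      tblInv n m tbl → ord.toList = (List.range m).map (X n) →
      (aloopF fuel tbl ord (m : Int) (X n m)).1.toList = (List.range (hh+ll)).map (X n) ∧
      (aloopF fuel tbl ord (m : Int) (X n m)).2.1 = (hh : Int) ∧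
      (aloopF fuel tbl ord (m : Int) (X n m)).2.2 = ((hh+ll : Nat) : Int) := by
  intro fuel
  induction fuel with
  | zero =>
      intro m tbl ord hm1 hmc hfuel hI hord
      have hmeq : m = hh + ll := by omega
      subst hmeq
      simp only [aloopF]
      rw [tbl_lookup_exit n hh ll hll hc hinj hXr tbl hI]
      exact ⟨hord, by trivial, by trivial⟩
  | succ fuel ih =>
      intro m tbl ord hm1 hmc hfuel hI hord
      by_cases hmeq : m = hh + ll
      · subst hmeq
        simp only [aloopF]
        rw [tbl_lookup_exit n hh ll hll hc hinj hXr tbl hI]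
        have : ¬ ((hh : Int) < 0) := by omega
        simp only [this, if_false]
        exact ⟨hord, by trivial, by trivial⟩
      · -- m < hh + ll : the loop body runs
        have hmlt : m < hh + ll := by omega
        obtain ⟨hsz, hIv⟩ := hI
        have hvr := hXr m
        have hv : (X n m).toNat < 100000 := by omega
        have hvX : ((X n m).toNat : Int) = X n m := by omega
        have hlook : tbl.getD (X n m).toNat (-1) = -1 := by
          rcases hIv _ hv with ⟨h1, _⟩ | ⟨i, him, _, hXi, _⟩
          · exact h1
          · exact absurd (by rw [hXi, hvX] : X n i = X n m)
              (hinj i m him hmlt)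
        simp only [aloopF, hlook]
        norm_num
        -- new state
        have hI' : tblInv n (m+1) (tbl.setIfInBounds (X n m).toNat (m : Int)) := by
          constructor
          · simp [hsz]
          · intro u hu
            by_cases huv : u = (X n m).toNat
            · right
              refine ⟨m, by omega, ?_, by rw [huv, hvX], ?_⟩
              · rw [huv, getD_lt _ _ (by simp [hsz]; omega) _]
                simp [Array.getElem_setIfInBounds]
              · intro i' hi' hXi'
                rcases hIv _ hu with ⟨_, hnone⟩ | ⟨i, him, _, hXi, hmin⟩
                · exact hnone i' hi' hXi'
                · exact absurd (by rw [hXi, huv, hvX] : X n i = X n m) (hinj i m him hmlt)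
            · have hgd : (tbl.setIfInBounds (X n m).toNat (m : Int)).getD u (-1)
                  = tbl.getD u (-1) := by
                rw [getD_lt _ _ (by simp [hsz]; omega) _, getD_lt _ _ (by omega) _]
                rw [Array.getElem_setIfInBounds_ne]
                omega
              rcases hIv _ hu with ⟨h1, h2⟩ | ⟨i, him, hval, hXi, hmin⟩
              · left
                refine ⟨by rw [hgd]; exact h1, ?_⟩
                intro i hi
                rcases Nat.lt_or_ge i m with h | h
                · exact h2 i h
                · have : i = m := by omega
                  subst this
                  intro hXu
                  exact huv (by omega)
              · right
                exact ⟨i, by omega, by rw [hgd]; exact hval, hXi, hmin⟩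
        have hord' : (ord.push (X n m)).toList = (List.range (m+1)).map (X n) := by
          rw [Array.toList_push, hord, List.range_succ, List.map_append, List.map_singleton]
        have hnext : func (X n m) = X n (m+1) := (X_succ n m).symm
        have hcount : (m : Int) + 1 = ((m+1 : Nat) : Int) := by push_cast; ring
        rw [hcount, hnext]
        exact ih (m+1) _ _ (by omega) (by omega) (by omega) hI' hord'

-- the effective index both programs use
def effNat (hh ll : Nat) (k : Int) : Nat :=
  if k ≤ (hh:Int) then k.toNat else hh + ((k - hh).emod ll).toNat

theorem solveA_eq (n : Int) (hh ll : Nat) (hll : 1 ≤ ll) (hcle : hh + ll ≤ 100000)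
    (hc : X n (hh+ll) = X n hh)
    (hinj : ∀ i j, i < j → j < hh + ll → X n i ≠ X n j)
    (hn0 : 0 ≤ n) (hn1 : n < 100000)
    (k : Int) (hk : 0 ≤ k) :
    solve n k = X n (effNat hh ll k) := by
  have hXr := X_range n hn0 hn1
  -- initial state
  have hI0 : tblInv n 1 ((Array.replicate 100000 (-1 : Int)).setIfInBounds n.toNat 0) := by
    constructor
    · simp
    · intro v hv
      by_cases hvn : v = n.toNat
      · subst hvn
        right
        refine ⟨0, by omega, ?_, by show n = _; omega, by intro i' hi'; omega⟩
        rw [getD_lt _ _ (by simp; omega) _]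
        simp
      · left
        constructor
        · rw [getD_lt _ _ (by simp; omega) _,
            Array.getElem_setIfInBounds_ne (by simp; omega) (fun h => hvn h.symm)]
          simp
        · intro i hi
          have : i = 0 := by omega
          subst this
          show ¬ (n = _)
          omega
  have hord0 : (#[n] : Array Int).toList = (List.range 1).map (X n) := by
    simp [List.range_succ]
    rfl
  have hmain := aloop_spec n hh ll hll hc hinj hXr 100000 1
    ((Array.replicate 100000 (-1 : Int)).setIfInBounds n.toNat 0) #[n]
    (by omega) (by omega) (by omega) hI0 hord0
  obtain ⟨hordC, hheadC, hcountC⟩ := hmain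
  rw [show ((1:Nat):Int) = (1:Int) from rfl, show X n 1 = func n from rfl]
    at hordC hheadC hcountC
  simp only [solve]
  rw [hordC, hheadC, hcountC]
  have hlp : ((hh+ll : Nat) : Int) - (hh : Int) = (ll : Int) := by push_cast; ring
  rw [hlp]
  unfold effNat
  by_cases hbr : k ≤ (hh : Int)
  · rw [if_pos hbr, if_pos hbr]
    have hkc : k.toNat < hh + ll := by omega
    rw [PySem.List.pyGet?_of_nonneg _ hk]
    simp [List.getElem?_map, List.getElem?_range, hkc]
  · rw [if_neg hbr, if_neg hbr]
    have hmodeq : PySem.Int.mod (k - (hh:Int)) (ll:Int) = (k - (hh:Int)).emod (ll:Int) :=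
      PySem.Int.mod_eq_emod_of_pos (by omega)
    rw [hmodeq]
    set e : Int := (k - (hh:Int)).emod (ll:Int) with he
    have he0 : 0 ≤ e := Int.emod_nonneg _ (by omega)
    have hel : e < (ll : Int) := Int.emod_lt_of_pos _ (by omega)
    have hidx : ((hh:Int) + e) = ((hh + e.toNat : Nat) : Int) := by push_cast; omega
    rw [hidx, PySem.List.pyGet?_of_nonneg _ (by omega)]
    have hto : ((hh + e.toNat : Nat) : Int).toNat = hh + e.toNat := by omega
    rw [hto]
    have hlt : hh + e.toNat < hh + ll := by omega
    simp [List.getElem?_map, List.getElem?_range, hlt]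

-- ---------- B side ----------

theorem p1_spec (n : Int) (T : Nat) (hT1 : 1 ≤ T) (hT : X n T = X n (2*T))
    (hTmin : ∀ t, 1 ≤ t → t < T → X n t ≠ X n (2*t)) :
    ∀ fuel i, 1 ≤ i → i ≤ T → T - i ≤ fuel →
      p1F fuel (X n i) (X n (2*i)) = X n (2*T) := by
  intro fuel
  induction fuel with
  | zero =>
      intro i hi1 hiT hfuel
      have : i = T := by omega
      subst this
      rfl
  | succ fuel ih =>
      intro i hi1 hiT hfuel
      by_cases hiT' : i = T
      · subst hiT'
        simp only [p1F, if_pos hT]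
      · have hilt : i < T := by omega
        have hne : X n i ≠ X n (2*i) := hTmin i hi1 hilt
        simp only [p1F, if_neg hne]
        have e1 : func (X n i) = X n (i+1) := (X_succ n i).symm
        have e2 : func (func (X n (2*i))) = X n (2*(i+1)) := by
          rw [show 2*(i+1) = (2*i+1)+1 from by ring, X_succ, X_succ]
        rw [e1, e2]
        exact ih (i+1) (by omega) (by omega) (by omega)

theorem p2_spec (n : Int) (T hhh : Nat)
    (hmeet : ∀ i, hhh ≤ i → X n (2*T + i) = X n i)
    (hne : ∀ i, i < hhh → X n i ≠ X n (2*T + i)) :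
    ∀ fuel i, i ≤ hhh → hhh - i ≤ fuel →
      p2F fuel (i:Int) (X n i) (X n (2*T + i)) = ((hhh:Int), X n hhh) := by
  intro fuel
  induction fuel with
  | zero =>
      intro i hih hfuel
      have : i = hhh := by omega
      subst this
      rfl
  | succ fuel ih =>
      intro i hih hfuel
      by_cases hieq : i = hhh
      · subst hieq
        simp only [p2F, if_pos (hmeet i le_rfl).symm]
      · have hilt : i < hhh := by omega
        simp only [p2F, if_neg (hne i hilt)]
        have e1 : func (X n i) = X n (i+1) := (X_succ n i).symm
        have e2 : func (X n (2*T + i)) = X n (2*T + (i+1)) := by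
          rw [show 2*T + (i+1) = (2*T+i)+1 from by ring, X_succ]
        have e3 : (i:Int) + 1 = ((i+1 : Nat) : Int) := by push_cast; ring
        rw [e1, e2, e3]
        exact ih (i+1) (by omega) (by omega)

theorem p3_spec (n : Int) (hhh ll : Nat) (hll : 1 ≤ ll)
    (hper : X n (hhh + ll) = X n hhh)
    (hne3 : ∀ j, 1 ≤ j → j < ll → X n hhh ≠ X n (hhh + j)) :
    ∀ fuel j, 1 ≤ j → j ≤ ll → ll - j ≤ fuel →
      p3F fuel (j:Int) (X n hhh) (X n (hhh + j)) = (ll:Int) := by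
  intro fuel
  induction fuel with
  | zero =>
      intro j hj1 hjl hfuel
      have : j = ll := by omega
      subst this
      rfl
  | succ fuel ih =>
      intro j hj1 hjl hfuel
      by_cases hjeq : j = ll
      · subst hjeq
        simp only [p3F, if_pos hper.symm]
      · have hjlt : j < ll := by omega
        simp only [p3F, if_neg (hne3 j hj1 hjlt)]
        have e2 : func (X n (hhh + j)) = X n (hhh + (j+1)) := by
          rw [show hhh + (j+1) = (hhh+j)+1 from by ring, X_succ]
        have e3 : (j:Int) + 1 = ((j+1 : Nat) : Int) := by push_cast; ring
        rw [e2, e3]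
        exact ih (j+1) (by omega) (by omega) (by omega)

theorem solveB_eq (n : Int) (hh ll : Nat) (hll : 1 ≤ ll) (hcle : hh + ll ≤ 100000)
    (hc : X n (hh+ll) = X n hh)
    (hinj : ∀ i j, i < j → j < hh + ll → X n i ≠ X n j)
    (k : Int) (hk : 0 ≤ k) :
    solve_alt n k = X n (effNat hh ll k) := by
  have hchar := eqchar n hh ll hll hc hinj
  have hchar' := eqchar' n hh ll hc
  -- T := first index with X T = X 2T; witness t0 := hh/ll*ll + ll
  have hRex : ∃ t, 1 ≤ t ∧ X n t = X n (2*t) := by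
    refine ⟨hh / ll * ll + ll, by omega, ?_⟩
    have ht0h : hh ≤ hh / ll * ll + ll := by
      have := Nat.lt_div_mul_add (a := hh) (b := ll) (by omega)
      omega
    refine hchar' _ _ ht0h (by omega) ?_
    rw [show 2*(hh / ll * ll + ll) - (hh / ll * ll + ll) = hh / ll * ll + ll from by omega]
    exact ⟨hh / ll + 1, by ring⟩
  let T := Nat.find hRex
  obtain ⟨hT1, hT⟩ : 1 ≤ T ∧ X n T = X n (2*T) := Nat.find_spec hRex
  have hTmin : ∀ t, 1 ≤ t → t < T → X n t ≠ X n (2*t) := by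
    intro t ht1 htT hXt
    exact Nat.find_min hRex htT ⟨ht1, hXt⟩
  have hTle : T ≤ 100000 := by
    have h1 : T ≤ hh / ll * ll + ll := Nat.find_min' hRex (by
      constructor
      · omega
      · have ht0h : hh ≤ hh / ll * ll + ll := by
          have := Nat.lt_div_mul_add (a := hh) (b := ll) (by omega)
          omega
        refine hchar' _ _ ht0h (by omega) ?_
        rw [show 2*(hh / ll * ll + ll) - (hh / ll * ll + ll) = hh / ll * ll + ll from by omega]
        exact ⟨hh / ll + 1, by ring⟩)
    have h2 : hh / ll * ll ≤ hh := Nat.div_mul_le_self _ _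
    omega
  -- structure of T : hh ≤ T and ll ∣ T
  have hTst : hh ≤ T ∧ ll ∣ T := by
    rcases hchar T (2*T) (by omega) hT with h | ⟨h1, h2⟩
    · omega
    · rw [show 2*T - T = T from by omega] at h2
      exact ⟨h1, h2⟩
  -- phase 2 facts
  have hmeet : ∀ i, hh ≤ i → X n (2*T + i) = X n i := by
    intro i hi
    refine (hchar' i (2*T + i) hi (by omega) ?_).symm
    rw [show 2*T + i - i = 2*T from by omega]
    exact Dvd.dvd.mul_left hTst.2 2
  have hne : ∀ i, i < hh → X n i ≠ X n (2*T + i) := by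
    intro i hih hXi
    rcases hchar i (2*T + i) (by omega) hXi with h | ⟨h1, _⟩
    · omega
    · omega
  -- phase 3 facts
  have hne3 : ∀ j, 1 ≤ j → j < ll → X n hh ≠ X n (hh + j) := by
    intro j hj1 hjl hXj
    rcases hchar hh (hh + j) (by omega) hXj with h | ⟨_, h2⟩
    · omega
    · rw [show hh + j - hh = j from by omega] at h2
      have := Nat.le_of_dvd (by omega) h2
      omega
  -- assemble
  have hp1 : p1F 100000 (func n) (func (func n)) = X n (2*T) := by
    rw [show func (func n) = X n (2*1) from rfl, show func n = X n 1 from rfl]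
    exact p1_spec n T hT1 hT hTmin 100000 1 le_rfl hT1 (by omega)
  have hp2 : p2F 100000 0 n (X n (2*T)) = ((hh:Int), X n hh) := by
    have h := p2_spec n T hh hmeet hne 100000 0 (by omega) (by omega)
    rw [show ((0:Nat):Int) = (0:Int) from rfl, show X n 0 = n from rfl, Nat.add_zero] at h
    exact h
  have hp3 : p3F 100000 1 (X n hh) (func (X n hh)) = (ll:Int) := by
    have h := p3_spec n hh ll hll hc hne3 100000 1 le_rfl (by omega) (by omega)
    rw [show ((1:Nat):Int) = (1:Int) from rfl, show X n (hh+1) = func (X n hh) from X_succ n hh]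
      at h
    exact h
  simp only [solve_alt, hp1, hp2, hp3]
  unfold effNat
  by_cases hbr : k ≤ (hh : Int)
  · rw [if_pos hbr, if_pos hbr]
    rfl
  · rw [if_neg hbr, if_neg hbr]
    have hmodeq : PySem.Int.mod (k - (hh:Int)) (ll:Int) = (k - (hh:Int)).emod (ll:Int) :=
      PySem.Int.mod_eq_emod_of_pos (by omega)
    rw [hmodeq]
    have he0 : 0 ≤ (k - (hh:Int)).emod (ll:Int) := Int.emod_nonneg _ (by omega)
    rw [show ((hh:Int) + (k - (hh:Int)).emod (ll:Int)).toNat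
        = hh + ((k - (hh:Int)).emod (ll:Int)).toNat from by omega]
    rfl

-- ===== VERDICT (by name: the statement is the Claim_ definition above) =====
theorem solve_spec : Claim_equal_solve := by
  intro n k _ hpre
  have hpre' : 0 ≤ n ∧ n < 100000 ∧ 0 ≤ k := hpre
  obtain ⟨hn0, hn1, hk⟩ := hpre'
  obtain ⟨hh, ll, hll, hcle, hc, hinj⟩ := cycle_exists n hn0 hn1
  show solve n k = solve_alt n k
  rw [solveA_eq n hh ll hll hcle hc hinj hn0 hn1 k hk,
    solveB_eq n hh ll hll hcle hc hinj k hk]
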